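-- pv_equiv track=rewrite | github.com/ikedim01/proteinscan | proteinscan/readuniprot.py | datEntrySeq
-- ===== SOURCE A (Python) =====
-- def datEntrySeq(datEntry) :
--     "Returns the amino acid sequence from a .dat file entry as a single string."
--     seqL = []
--     for ln in reversed(datEntry) :
--         ln = ln.strip()
--         if ln.startswith('SQ ') :
--             break
--         seqL.append(ln.replace(' ',''))
--     return ''.join(reversed(seqL))
-- ===== SOURCE B (Python) =====
-- def datEntrySeq(datEntry):
--     "Returns the amino acid sequence from a .dat file entry as a single string."
--     idx = -1
--     for i, ln in enumerate(datEntry):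
--         if ln.strip().startswith('SQ '):
--             idx = i
--     return ''.join(ln.strip().replace(' ', '') for ln in datEntry[idx + 1:])
-- ===== Notes on version B (the rewrite author's own statement) =====
-- stated objective: alternative
-- what changed: Replaces A's reverse iteration with break plus accumulate-and-reverse by a two-phase forward pass: locate the index of the last 'SQ ' header line, then map strip/replace over the slice after it and join in original order.
import Mathlib
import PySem

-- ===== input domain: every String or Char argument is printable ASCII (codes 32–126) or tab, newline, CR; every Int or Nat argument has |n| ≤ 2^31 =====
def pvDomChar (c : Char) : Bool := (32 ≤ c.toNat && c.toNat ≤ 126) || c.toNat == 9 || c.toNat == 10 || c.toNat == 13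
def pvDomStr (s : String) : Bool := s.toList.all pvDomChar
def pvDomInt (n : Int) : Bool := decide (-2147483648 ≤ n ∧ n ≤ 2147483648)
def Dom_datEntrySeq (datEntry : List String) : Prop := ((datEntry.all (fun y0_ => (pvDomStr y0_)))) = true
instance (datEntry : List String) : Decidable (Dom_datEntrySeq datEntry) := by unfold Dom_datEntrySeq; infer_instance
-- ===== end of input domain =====

-- B replaces A's reverse-scan-with-break (accumulate then reverse) by a two-phase
-- forward pass: find the index of the last 'SQ ' header, then map-join the slice after it.


-- ===== PORT A =====
-- the 'for ln in reversed(datEntry)' loop with break: builds seqL in append order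
def datEntrySeqLoop : List String → List String
  | [] => []
  | ln :: rest =>
      let l := PySem.Str.strip ln
      if PySem.Str.startswith l "SQ " then []
      else PySem.Str.replace l " " "" :: datEntrySeqLoop rest

def datEntrySeq (datEntry : List String) : String :=
  PySem.Str.join "" (datEntrySeqLoop datEntry.reverse).reverse

-- ===== PORT B =====
def datEntrySeq_alt (datEntry : List String) : String :=
  let idx : Int := (PySem.List.enumerate datEntry 0).foldl
      (fun acc p => if PySem.Str.startswith (PySem.Str.strip p.2) "SQ " then p.1 else acc) (-1)
  PySem.Str.join ""
    ((PySem.List.slice datEntry (some (idx + 1)) none).map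
      (fun ln => PySem.Str.replace (PySem.Str.strip ln) " " ""))

-- ===== PRECONDITION & SPEC =====
def Spec_datEntrySeq (datEntry : List String) (out : String) : Prop := out = datEntrySeq_alt datEntry
instance (datEntry : List String) (out : String) : Decidable (Spec_datEntrySeq datEntry out) := by unfold Spec_datEntrySeq; infer_instance

-- ===== CLAIM (what is proved, stated in full; the proofs are below) =====
def Claim_equal_datEntrySeq : Prop := ∀ (datEntry : List String), Dom_datEntrySeq datEntry → Spec_datEntrySeq datEntry (datEntrySeq datEntry)

-- ===== LEMMAS AND PROOFS =====

-- abbreviations used only in proofs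
def pvIsSQ (ln : String) : Bool := PySem.Str.startswith (PySem.Str.strip ln) "SQ "
def pvClean (ln : String) : String := PySem.Str.replace (PySem.Str.strip ln) " " ""
def pvLastIdx (l : List String) : Int :=
  (PySem.List.enumerate l 0).foldl (fun acc p => if pvIsSQ p.2 then p.1 else acc) (-1)

theorem datEntrySeqLoop_eq (l : List String) :
    datEntrySeqLoop l = (l.takeWhile (fun ln => !pvIsSQ ln)).map pvClean := by
  induction l with
  | nil => rfl
  | cons x xs ih =>
    show (if pvIsSQ x then [] else pvClean x :: datEntrySeqLoop xs) = _
    rw [List.takeWhile_cons]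
    cases h : pvIsSQ x
    · simp [h, ih]
    · simp [h]

theorem pvLastIdx_append (l : List String) (x : String) :
    pvLastIdx (l ++ [x]) = if pvIsSQ x then (l.length : Int) else pvLastIdx l := by
  unfold pvLastIdx
  rw [PySem.List.enumerate_append, List.foldl_append, PySem.List.enumerate_cons,
      PySem.List.enumerate_nil]
  simp only [List.foldl_cons, List.foldl_nil]
  cases h : pvIsSQ x <;> simp [h]

theorem pvLastIdx_bounds (l : List String) :
    -1 ≤ pvLastIdx l ∧ pvLastIdx l < (l.length : Int) := by
  induction l using List.reverseRecOn with
  | nil =>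
    constructor <;> norm_num [pvLastIdx, PySem.List.enumerate_nil]
  | append_singleton xs x ih =>
    rcases ih with ⟨h1, h2⟩
    rw [pvLastIdx_append]
    have hlen : ((xs ++ [x]).length : Int) = (xs.length : Int) + 1 := by simp
    split_ifs <;> omega

theorem pvSlice_eq_takeWhile_rev (l : List String) :
    PySem.List.slice l (some (pvLastIdx l + 1)) none =
      (l.reverse.takeWhile (fun ln => !pvIsSQ ln)).reverse := by
  induction l using List.reverseRecOn with
  | nil =>
    have h0 : (0 : Int) ≤ pvLastIdx [] + 1 := by norm_num [pvLastIdx, PySem.List.enumerate_nil]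
    rw [PySem.List.slice_from _ h0]
    simp
  | append_singleton xs x ih =>
    rw [pvLastIdx_append]
    cases h : pvIsSQ x
    · simp only [Bool.false_eq_true, if_false]
      have hb := pvLastIdx_bounds xs
      have h0 : (0 : Int) ≤ pvLastIdx xs + 1 := by omega
      have hle : (pvLastIdx xs + 1).toNat ≤ xs.length := by omega
      rw [PySem.List.slice_from _ h0] at ih ⊢
      rw [List.drop_append_of_le_length hle]
      simp [List.takeWhile_cons, h, ih]
    · simp only [if_true]
      rw [show ((xs.length : Int) + 1) = (((xs.length + 1 : Nat) : Int)) by push_cast; ring]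
      rw [PySem.List.slice_from_natCast]
      simp [List.takeWhile_cons, h]

-- ===== VERDICT (by name: the statement is the Claim_ definition above) =====
theorem datEntrySeq_spec : Claim_equal_datEntrySeq := by
  intro datEntry _
  show PySem.Str.join "" (datEntrySeqLoop datEntry.reverse).reverse =
    PySem.Str.join "" ((PySem.List.slice datEntry (some (pvLastIdx datEntry + 1)) none).map pvClean)
  rw [datEntrySeqLoop_eq, ← List.map_reverse, pvSlice_eq_takeWhile_rev]
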